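-- pv_equiv track=rewrite | github.com/DarkCartographer/Quine-McCluskey-Implementation-in-Python | QM_MultiOutput.py | simulate_blif
-- ===== SOURCE A (Python) =====
-- import itertools
--
-- def simulate_blif(model_name, inputs, outputs, names_blocks):
--
--     #track all variables with these
--     variables = set(inputs)
--     variables.update(outputs)   #add outputs
--     intermediate_vars = set()   #intermideate variables (not a primary input or output)
--     var_order = []  #keep track of the order to evaluate variables
--     functions = {}
--
--
--     #go through each logic block and build the corresponding truth table
--     for block in names_blocks:
--         block_vars = block['inputs_outputs']
--         output_var = block_vars[-1]         #last variable is the output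
--         input_vars = block_vars[:-1]        #all others are inputs
--         variables.update(block_vars)        #add them this set
--         if output_var not in outputs:
--             intermediate_vars.add(output_var)       #if not a primary output, mark it as intermediate
--         var_order.append(output_var)
--         # Build truth table for this block
--         terms = []
--         for line in block['lines']:
--             if ' ' in line:
--                 in_part, out_part = line.split()
--                 if out_part == '1':
--                     terms.append(in_part)
--         functions[output_var] = {'inputs': input_vars, 'terms': terms}
--
--     # Generate truth tables for all primary outputs
--     input_vars = inputs
--     n = len(input_vars)
--     truth_tables = {output: {} for output in outputs}
--     for bits in itertools.product([0, 1], repeat=n):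
--         assignment = dict(zip(input_vars, bits))
--
--         # Evaluate intermediate variables
--         for var in var_order:
--             func = functions[var]
--             input_vals = ''.join([str(assignment[v]) if v in assignment else '0' for v in func['inputs']])
--             value = 0
--             for term in func['terms']:
--                 match = True
--                 for idx, char in enumerate(term):
--                     if char != '-' and char != input_vals[idx]:
--                         match = False
--                         break
--                 if match:
--                     value = 1
--                     break
--             assignment[var] = value         #if a match was found, store the calculated value
--
--         # Record the truth table for primary outputs
--         input_key = ''.join(map(str, bits))     #convert the values to a binary string
--         for output in outputs:
--             output_value = assignment[output]
--             truth_tables[output][input_key] = output_value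
--     return truth_tables, input_vars
-- ===== SOURCE B (Python) =====
-- def simulate_blif(model_name, inputs, outputs, names_blocks):
--     # Bitset simulation: each variable's whole truth-table column is one integer
--     # whose bit r is the variable's value on the r-th input assignment, so every
--     # cube is applied to all 2**n rows at once with bitwise AND/OR.
--     var_order = []
--     functions = {}
--     for block in names_blocks:
--         io = block['inputs_outputs']
--         var_order.append(io[-1])
--         terms = [l.split()[0] for l in block['lines']
--                  if ' ' in l and l.split()[1:] == ['1']]
--         functions[io[-1]] = (io[:-1], terms)
--
--     n = len(inputs)
--     size = 1 << n
--     full = (1 << size) - 1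
--     cols = {}
--     for i, v in enumerate(inputs):
--         col = 0
--         for r in range(size):
--             col |= ((r >> (n - 1 - i)) & 1) << r
--         cols[v] = col
--
--     for var in var_order:
--         in_vars, terms = functions[var]
--         srcs = [cols.get(v, 0) for v in in_vars]
--         acc = 0
--         for t in terms:
--             m = full
--             for k, ch in enumerate(t):
--                 if ch == '-':
--                     continue
--                 if k < len(srcs) and ch == '1':
--                     m &= srcs[k]
--                 elif k < len(srcs) and ch == '0':
--                     m &= full ^ srcs[k]
--                 else:
--                     m = 0
--             acc |= m
--         cols[var] = acc
--
--     keys = [''.join('1' if (r >> (n - 1 - i)) & 1 else '0' for i in range(n))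
--             for r in range(size)]
--     truth_tables = {o: {k: (cols[o] >> r) & 1 for r, k in enumerate(keys)}
--                     for o in outputs}
--     return truth_tables, inputs
-- ===== Notes on version B (the rewrite author's own statement) =====
-- stated objective: alternative
-- what changed: Replaces the row-major simulation (outer loop over all 2^n assignments, rebuilding a per-row string and scanning cubes for every variable) by a bitset simulation: each variable's entire truth-table column is a single integer with bit r holding the value on the r-th assignment, and every cube is applied to all rows at once with bitwise AND/XOR/OR; output tables are read off the finished column bits.
import Mathlib
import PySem

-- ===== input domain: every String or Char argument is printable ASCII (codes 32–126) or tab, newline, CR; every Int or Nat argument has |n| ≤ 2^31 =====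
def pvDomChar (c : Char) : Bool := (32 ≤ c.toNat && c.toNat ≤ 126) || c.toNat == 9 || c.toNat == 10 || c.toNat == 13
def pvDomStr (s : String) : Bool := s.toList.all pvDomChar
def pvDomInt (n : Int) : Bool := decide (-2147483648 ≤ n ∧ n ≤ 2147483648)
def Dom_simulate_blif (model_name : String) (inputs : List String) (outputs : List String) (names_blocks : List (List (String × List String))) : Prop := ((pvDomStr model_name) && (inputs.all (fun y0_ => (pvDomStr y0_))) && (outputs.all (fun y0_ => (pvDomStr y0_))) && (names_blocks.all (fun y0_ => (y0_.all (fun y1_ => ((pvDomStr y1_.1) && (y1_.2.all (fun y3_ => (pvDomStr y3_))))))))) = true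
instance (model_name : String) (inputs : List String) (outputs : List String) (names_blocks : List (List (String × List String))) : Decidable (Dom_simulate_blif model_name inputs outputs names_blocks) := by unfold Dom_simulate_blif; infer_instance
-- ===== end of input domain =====

-- B replaces the row-major simulation (one pass over all 2^n assignments, re-evaluating every
-- variable per row) by a bitset simulation: each variable's whole truth-table column is one
-- integer with bit r holding its value on row r, and each cube is applied to all rows at once
-- with bitwise AND/XOR/OR.

-- ===== PORT A =====

-- inner loop over block['lines']: collect in_part of lines "<in> 1"
def pvLineStepA (terms : List String) (line : String) : List String :=
  if PySem.Str.isIn " " line then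
    match PySem.Str.split₀ line with
    | [in_part, out_part] => if out_part = "1" then terms ++ [in_part] else terms
    | _ => terms  -- Python: 'in_part, out_part = line.split()' raises ValueError here; excluded by Pre_
  else terms

-- one iteration of 'for block in names_blocks'; state = (variables, intermediate_vars, var_order, functions)
def pvBlockStepA (outputs : List String)
    (st : PySem.Set String × PySem.Set String × List String × PySem.Dict String (List String × List String))
    (block : List (String × List String)) :
    PySem.Set String × PySem.Set String × List String × PySem.Dict String (List String × List String) :=
  let block_vars := (PySem.Dict.mk block).getD "inputs_outputs" []  -- block['inputs_outputs']; KeyError if absent: excluded by Pre_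
  let output_var := (PySem.List.pyGet? block_vars (-1)).getD ""     -- block_vars[-1]; IndexError on []: excluded by Pre_
  let input_vars := PySem.List.slice block_vars none (some (-1))    -- block_vars[:-1]
  let vars' := PySem.Set.update st.1 block_vars
  let inter := if output_var ∈ outputs then st.2.1 else PySem.Set.add st.2.1 output_var
  let var_order := st.2.2.1 ++ [output_var]
  let terms := ((PySem.Dict.mk block).getD "lines" []).foldl pvLineStepA []  -- block['lines']; KeyError excluded by Pre_
  (vars', inter, var_order, st.2.2.2.insert output_var (input_vars, terms))

-- itertools.product([0, 1], repeat=n), as its standard recursion (first coordinate varies slowest)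
def pvProdA : Nat → List (List Int)
  | 0 => [[]]
  | n + 1 => [(0 : Int), 1].flatMap (fun b => (pvProdA n).map (fun t => b :: t))

-- 'for idx, char in enumerate(term): if char != '-' and char != input_vals[idx]: match=False; break'
def pvMatchTermA (input_vals : List Char) : List (Int × Char) → Bool
  | [] => true
  | (idx, ch) :: rest =>
    if ch ≠ '-' then
      match PySem.List.pyGet? input_vals idx with
      | some c => if ch ≠ c then false else pvMatchTermA input_vals rest
      | none => false  -- Python: input_vals[idx] raises IndexError here; excluded by Pre_
    else pvMatchTermA input_vals rest

-- 'value = 0; for term in func['terms']: ... if match: value = 1; break'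
def pvValueA (input_vals : List Char) : List String → Int
  | [] => 0
  | t :: ts =>
    if pvMatchTermA input_vals (PySem.List.enumerate t.toList) then 1
    else pvValueA input_vals ts

-- body of 'for var in var_order'
def pvEvalVarA (functions : PySem.Dict String (List String × List String))
    (assignment : PySem.Dict String Int) (var : String) : PySem.Dict String Int :=
  let func := (functions.get? var).getD ([], [])  -- functions[var]: always present (var appended together with its entry)
  -- ''.join(str(assignment[v]) if v in assignment else '0' for v in func['inputs']), ported over List Char (exact: join of strings = concatenation)
  let input_vals : List Char := func.1.flatMap (fun v =>
      match assignment.get? v with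
      | some x => (PySem.Int.toStr x).toList
      | none => ['0'])
  assignment.insert var (pvValueA input_vals func.2)

def simulate_blif (model_name : String) (inputs : List String) (outputs : List String) (names_blocks : List (List (String × List String))) : (List (String × List (String × Int))) × List String :=
  let st := names_blocks.foldl (pvBlockStepA outputs)
      (PySem.Set.update (PySem.Set.ofList inputs) outputs, PySem.Set.ofList [], [], PySem.Dict.empty)
  let var_order := st.2.2.1
  let functions := st.2.2.2
  let input_vars := inputs
  let n := input_vars.length
  -- truth_tables = {output: {} for output in outputs}
  let truth0 : PySem.Dict String (PySem.Dict String Int) :=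
    outputs.foldl (fun d o => d.insert o PySem.Dict.empty) PySem.Dict.empty
  let tt := (pvProdA n).foldl (fun tt bits =>
      let assignment := (input_vars.zip bits).foldl (fun d (p : String × Int) => d.insert p.1 p.2) PySem.Dict.empty
      let assignment := var_order.foldl (pvEvalVarA functions) assignment
      let input_key := PySem.Str.join "" (bits.map PySem.Int.toStr)  -- ''.join(map(str, bits))
      outputs.foldl (fun tt o =>
          -- truth_tables[output][input_key] = assignment[output]; assignment[output] raises KeyError if absent: excluded by Pre_
          tt.insert o (((tt.get? o).getD PySem.Dict.empty).insert input_key ((assignment.get? o).getD 0)))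
        tt)
    truth0
  (tt.items.map (fun p => (p.1, p.2.items)), input_vars)

-- ===== PORT B =====
-- All bit work in B is on nonnegative Python ints, ported exactly as Nat with <<< >>> &&& ||| ^^^.

-- "[l.split()[0] for l in block['lines'] if ' ' in l and l.split()[1:] == ['1']]"
def pvTermsB (lines : List String) : List String :=
  (lines.filter (fun l => PySem.Str.isIn " " l && ((PySem.Str.split₀ l).drop 1 == ["1"]))).map
    (fun l => (PySem.Str.split₀ l).headD "")  -- l.split()[0]; the filter guarantees a nonempty split

-- one iteration of Source B's parsing loop; state = (var_order, functions)
def pvParseStepB (st : List String × PySem.Dict String (List String × List String))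
    (block : List (String × List String)) : List String × PySem.Dict String (List String × List String) :=
  let io := (PySem.Dict.mk block).getD "inputs_outputs" []      -- block['inputs_outputs']; KeyError excluded by Pre_
  let last := (PySem.List.pyGet? io (-1)).getD ""               -- io[-1]; IndexError on [] excluded by Pre_
  (st.1 ++ [last], st.2.insert last (PySem.List.slice io none (some (-1)),
    pvTermsB ((PySem.Dict.mk block).getD "lines" [])))

-- "col = 0; for r in range(size): col |= ((r >> (n-1-i)) & 1) << r"
def pvInColB (n i size : Nat) : Nat :=
  (List.range size).foldl (fun col r => col ||| ((r >>> (n - 1 - i)) &&& 1) <<< r) 0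

-- one 'k, ch' step of Source B's cube-mask loop
def pvMaskStepB (full : Nat) (srcs : List Nat) (m : Nat) (p : Int × Char) : Nat :=
  if p.2 = '-' then m
  else match srcs[p.1.toNat]? with
    | some s =>
      if p.2 = '1' then m &&& s
      else if p.2 = '0' then m &&& (full ^^^ s)
      else 0
    | none => 0

-- body of Source B's 'for var in var_order' (whole column at once, as one bitmask)
def pvColStepB (fns : PySem.Dict String (List String × List String)) (full : Nat)
    (cols : PySem.Dict String Nat) (var : String) : PySem.Dict String Nat :=
  let fn := (fns.get? var).getD ([], [])
  let srcs := fn.1.map (fun v => (cols.get? v).getD 0)           -- cols.get(v, 0)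
  let acc := fn.2.foldl (fun acc t =>
      acc ||| ((PySem.List.enumerate t.toList).foldl (pvMaskStepB full srcs) full)) 0
  cols.insert var acc

def simulate_blif_alt (model_name : String) (inputs : List String) (outputs : List String) (names_blocks : List (List (String × List String))) : (List (String × List (String × Int))) × List String :=
  let pb := names_blocks.foldl pvParseStepB ([], PySem.Dict.empty)
  let n := inputs.length
  let size := 2 ^ n                                              -- 1 << n
  let full := 2 ^ size - 1                                       -- (1 << size) - 1
  let cols0 := (PySem.List.enumerate inputs).foldl (fun d (p : Int × String) =>
      d.insert p.2 (pvInColB n p.1.toNat size)) PySem.Dict.empty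
  let cols := pb.1.foldl (pvColStepB pb.2 full) cols0
  let keys := (List.range size).map (fun r =>
      PySem.Str.join "" ((List.range n).map (fun i =>
        if (r >>> (n - 1 - i)) &&& 1 = 1 then "1" else "0")))
  let tt := outputs.foldl (fun tt o =>
      tt.insert o ((PySem.List.enumerate keys).foldl
        (fun (d : PySem.Dict String Int) p =>
          d.insert p.2 (((((cols.get? o).getD 0) >>> p.1.toNat) &&& 1 : Nat) : Int))  -- cols[o]; KeyError excluded by Pre_
        PySem.Dict.empty)) PySem.Dict.empty
  (tt.items.map (fun p => (p.1, p.2.items)), inputs)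

-- ===== PRECONDITION & SPEC =====
-- Pre_ excludes the inputs on which Python A raises (a block without the 'inputs_outputs'/'lines'
-- keys, an empty inputs_outputs list, a covering line that does not split into exactly two words,
-- a primary output that is neither an input nor defined by a block — KeyError/IndexError/ValueError),
-- plus two defensible corners: blocks whose association list carries a duplicate key (a Python dict
-- literal cannot even express them), and '1'-terms that constrain a position beyond the block's
-- input count — there A raises IndexError whenever some assignment satisfies the term's in-range
-- prefix, a condition only circuit simulation can decide, so all such terms are excluded
-- conservatively; B treats such a term as never matching, which is exactly A's value whenever A
-- does return (see cites).
def Pre_simulate_blif (model_name : String) (inputs : List String) (outputs : List String) (names_blocks : List (List (String × List String))) : Prop :=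
  (∀ b ∈ names_blocks,
    (b.map Prod.fst).Nodup ∧
    "inputs_outputs" ∈ b.map Prod.fst ∧
    "lines" ∈ b.map Prod.fst ∧
    (PySem.Dict.mk b).getD "inputs_outputs" [] ≠ [] ∧
    (∀ l ∈ (PySem.Dict.mk b).getD "lines" [], PySem.Str.isIn " " l = true →
      (PySem.Str.split₀ l).length = 2 ∧
      ((PySem.Str.split₀ l).getD 1 "" = "1" →
        (((PySem.Str.split₀ l).headD "").toList.drop
            (((PySem.Dict.mk b).getD "inputs_outputs" []).length - 1)).all (· == '-') = true))) ∧
  (∀ o ∈ outputs, o ∈ inputs ∨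
    ∃ b ∈ names_blocks, PySem.List.pyGet? ((PySem.Dict.mk b).getD "inputs_outputs" []) (-1) = some o)
instance (model_name : String) (inputs : List String) (outputs : List String) (names_blocks : List (List (String × List String))) : Decidable (Pre_simulate_blif model_name inputs outputs names_blocks) := by unfold Pre_simulate_blif; infer_instance

def pvWitness_simulate_blif : String × List String × List String × (List (List (String × List String))) :=
  ("top", ["a", "b"], ["y"], [[("inputs_outputs", ["a", "b", "y"]), ("lines", ["1- 1", "01 1"])]])

def Spec_simulate_blif (model_name : String) (inputs : List String) (outputs : List String) (names_blocks : List (List (String × List String))) (out : (List (String × List (String × Int))) × List String) : Prop := out = simulate_blif_alt model_name inputs outputs names_blocks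
instance (model_name : String) (inputs : List String) (outputs : List String) (names_blocks : List (List (String × List String))) (out : (List (String × List (String × Int))) × List String) : Decidable (Spec_simulate_blif model_name inputs outputs names_blocks out) := by unfold Spec_simulate_blif; infer_instance

-- ===== CLAIM (what is proved, stated in full; the proofs are below) =====
def Claim_equal_simulate_blif : Prop := ∀ (model_name : String) (inputs : List String) (outputs : List String) (names_blocks : List (List (String × List String))), Dom_simulate_blif model_name inputs outputs names_blocks → Pre_simulate_blif model_name inputs outputs names_blocks → Spec_simulate_blif model_name inputs outputs names_blocks (simulate_blif model_name inputs outputs names_blocks)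

-- ===== LEMMAS AND PROOFS =====

theorem pvTermsEq (lines : List String) : ∀ (acc : List String),
    lines.foldl pvLineStepA acc = acc ++ pvTermsB lines := by
  induction lines with
  | nil => simp [pvTermsB]
  | cons l ls ih =>
    intro acc
    simp only [List.foldl_cons, ih]
    by_cases hsp : PySem.Chars.isIn [' '] l.toList = true
    · rcases hs : PySem.Str.split₀ l with _ | ⟨a, _ | ⟨b, _ | ⟨c, rest⟩⟩⟩ <;>
        simp [pvLineStepA, pvTermsB, hsp, hs, List.filter_cons] <;>
        by_cases hb : b = "1" <;> simp [hb, hs]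
    · simp [pvLineStepA, pvTermsB, hsp, List.filter_cons]

theorem pvParseEq (outputs : List String) (nbs : List (List (String × List String))) :
    ∀ (v i : PySem.Set String) (vo : List String) (fns : PySem.Dict String (List String × List String)),
    (nbs.foldl (pvBlockStepA outputs) (v, i, vo, fns)).2.2 = nbs.foldl pvParseStepB (vo, fns) := by
  induction nbs with
  | nil => intro v i vo fns; rfl
  | cons b bs ih =>
    intro v i vo fns
    simp only [List.foldl_cons, pvBlockStepA, ih]
    congr 1
    simp only [pvParseStepB, pvTermsEq]
    rfl

theorem pvProdA_length (n : Nat) : (pvProdA n).length = 2 ^ n := by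
  induction n with
  | zero => rfl
  | succ n ih => simp [pvProdA, ih, pow_succ]; ring

-- (r // (1 << (n - 1 - i))) & 1 as a Nat; A's product rows are indexed by it
def pvBitB (n i r : Nat) : Nat := r / 2 ^ (n - 1 - i) % 2

theorem pvProdA_getElem? (n : Nat) : ∀ r : Nat, r < 2 ^ n →
    (pvProdA n)[r]? = some ((List.range n).map (fun i => (pvBitB n i r : Int))) := by
  induction n with
  | zero => intro r hr; interval_cases r; rfl
  | succ n ih =>
    intro r hr
    have hsplit : pvProdA (n + 1) = (pvProdA n).map (fun t => (0 : Int) :: t) ++ (pvProdA n).map (fun t => (1 : Int) :: t) := by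
      simp [pvProdA]
    have hlen : ((pvProdA n).map (fun t => (0 : Int) :: t)).length = 2 ^ n := by
      simp [pvProdA_length]
    rw [hsplit]
    by_cases hlt : r < 2 ^ n
    · rw [List.getElem?_append_left (by omega)]
      rw [List.getElem?_map, ih r hlt]
      simp only [Option.map_some]
      congr 1
      rw [List.range_succ_eq_map]
      simp only [List.map_cons, List.map_map]
      congr 1
      · show (0 : Int) = (pvBitB (n+1) 0 r : Nat)
        have : pvBitB (n + 1) 0 r = 0 := by
          unfold pvBitB
          simp only [Nat.add_sub_cancel, Nat.sub_zero]
          rw [Nat.div_eq_of_lt hlt]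
        simp [this]
      · apply List.map_congr_left
        intro i _
        show ((pvBitB n i r : Nat) : Int) = (pvBitB (n+1) (i+1) r : Nat)
        unfold pvBitB
        have he : n + 1 - 1 - (i + 1) = n - 1 - i := by omega
        rw [he]
    · obtain ⟨r', rfl⟩ : ∃ r', r = 2 ^ n + r' := ⟨r - 2 ^ n, by omega⟩
      have hr' : r' < 2 ^ n := by
        have := Nat.pow_succ 2 n
        omega
      rw [List.getElem?_append_right (by omega)]
      rw [hlen]
      simp only [Nat.add_sub_cancel_left]
      rw [List.getElem?_map, ih r' hr']
      simp only [Option.map_some]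
      congr 1
      rw [List.range_succ_eq_map]
      simp only [List.map_cons, List.map_map]
      congr 1
      · show (1 : Int) = (pvBitB (n+1) 0 (2 ^ n + r') : Nat)
        have : pvBitB (n + 1) 0 (2 ^ n + r') = 1 := by
          unfold pvBitB
          simp only [Nat.add_sub_cancel, Nat.sub_zero]
          rw [Nat.add_div_left _ (Nat.pow_pos (by norm_num))]
          rw [Nat.div_eq_of_lt hr']
        simp [this]
      · apply List.map_congr_left
        intro i hi
        simp only [List.mem_range] at hi
        show ((pvBitB n i r' : Nat) : Int) = (pvBitB (n+1) (i+1) (2 ^ n + r') : Nat)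
        congr 1
        unfold pvBitB
        have h1 : n + 1 - 1 - (i + 1) = n - 1 - i := by omega
        rw [h1]
        obtain ⟨k, hk⟩ : ∃ k, n = n - 1 - i + 1 + k := ⟨n - (n - 1 - i) - 1, by omega⟩
        have h2 : 2 ^ n = 2 ^ (n - 1 - i) * (2 * 2 ^ k) := by
          have hpow : 2 ^ (n - 1 - i + 1 + k) = 2 ^ (n - 1 - i) * (2 * 2 ^ k) := by
            rw [pow_add, pow_add, pow_one]; ring
          rw [← hpow, ← hk]
        have hw : 0 < 2 ^ (n - 1 - i) := Nat.pow_pos (by norm_num)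
        conv_rhs => rw [h2, Nat.mul_add_div hw]
        omega

-- helper for the table phase: a fold inserting h o for each o
def pvIns (h : String → PySem.Dict String Int)
    (t : PySem.Dict String (PySem.Dict String Int)) (o : String) :
    PySem.Dict String (PySem.Dict String Int) :=
  t.insert o (h o)

theorem pvGet?_foldl_ins (h : String → PySem.Dict String Int) (os : List String) :
    ∀ (t : PySem.Dict String (PySem.Dict String Int)) (v : String),
    (os.foldl (pvIns h) t).get? v = if v ∈ os then some (h v) else t.get? v := by
  induction os with
  | nil => simp
  | cons o os ih =>
    intro t v
    simp only [List.foldl_cons, ih]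
    by_cases hv : v ∈ os
    · simp [hv]
    · by_cases hvo : v = o
      · subst hvo; simp [hv, pvIns, PySem.Dict.get?_insert_self]
      · simp [hv, hvo, pvIns, PySem.Dict.get?_insert_of_ne _ _ hvo]

-- first occurrences of os not in seen, paired with their h-value, in order
def pvFresh (h : String → PySem.Dict String Int) :
    List String → List String → List (String × PySem.Dict String Int)
  | [], _ => []
  | o :: os, seen =>
    if o ∈ seen then pvFresh h os seen else (o, h o) :: pvFresh h os (seen ++ [o])

theorem pvFresh_covers (h : String → PySem.Dict String Int) (os : List String) :
    ∀ (seen : List String) (o : String), o ∈ os →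
    o ∈ seen ∨ o ∈ (pvFresh h os seen).map Prod.fst := by
  induction os with
  | nil => simp
  | cons o' os ih =>
    intro seen o ho
    rcases List.mem_cons.mp ho with h1 | h1
    · subst h1
      by_cases hs : o ∈ seen
      · exact Or.inl hs
      · right; simp [pvFresh, hs]
    · by_cases hs : o' ∈ seen
      · simpa [pvFresh, hs] using ih seen o h1
      · rcases ih (seen ++ [o']) o h1 with h2 | h2
        · rcases List.mem_append.mp h2 with h3 | h3
          · exact Or.inl h3
          · right; simp at h3; simp [pvFresh, hs, h3]
        · right; simp [pvFresh, hs]; right; simpa using h2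

theorem pvItems_foldl_ins (h : String → PySem.Dict String Int) (os : List String) :
    ∀ (t : PySem.Dict String (PySem.Dict String Int)),
    (os.foldl (pvIns h) t).items =
      t.items.map (fun p => if p.1 ∈ os then (p.1, h p.1) else p) ++ pvFresh h os t.keys := by
  induction os with
  | nil => intro t; simp [pvFresh]
  | cons o os ih =>
    intro t
    simp only [List.foldl_cons, ih]
    by_cases hc : t.contains o = true
    · have hmem : o ∈ t.keys := (PySem.Dict.contains_iff_mem_keys t o).mp hc
      rw [show pvIns h t o = t.insert o (h o) from rfl]
      rw [PySem.Dict.items_insert_of_contains t (h o) hc,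
          PySem.Dict.keys_insert_of_contains t (h o) hc]
      congr 1
      · rw [List.map_map]
        apply List.map_congr_left
        intro p _
        by_cases hpo : p.1 = o <;> simp [Function.comp, hpo]
      · simp [pvFresh, hmem]
    · have hmem : o ∉ t.keys := fun hm => hc ((PySem.Dict.contains_iff_mem_keys t o).mpr hm)
      rw [show pvIns h t o = t.insert o (h o) from rfl]
      rw [PySem.Dict.items_insert_of_not_contains t (h o) (by simpa using hc),
          PySem.Dict.keys_insert_of_not_contains t (h o) (by simpa using hc)]
      simp only [List.map_append, List.map_cons, List.map_nil]
      have h1 : (if o ∈ os then (o, h o) else (o, h o)) = (o, h o) := by split <;> rfl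
      have h2 : ∀ p ∈ t.items, (if p.1 ∈ os then (p.1, h p.1) else p) =
          (if p.1 ∈ o :: os then (p.1, h p.1) else p) := by
        intro p hp
        by_cases hpo : p.1 = o
        · exact absurd (hpo ▸ PySem.Dict.mem_keys_of_mem_items t hp) hmem
        · by_cases hpos : p.1 ∈ os <;> simp [hpos, hpo]
      rw [List.map_congr_left h2, h1]
      simp only [pvFresh, hmem, if_neg]
      simp

theorem pvG (kx : String) (vf : String → Int) (g : String → PySem.Dict String Int) (os : List String) :
    ∀ (t : PySem.Dict String (PySem.Dict String Int)),
    (∀ o ∈ os, t.get? o = some (g o) ∨ t.get? o = some ((g o).insert kx (vf o))) →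
    os.foldl (fun t o => t.insert o (((t.get? o).getD PySem.Dict.empty).insert kx (vf o))) t =
      os.foldl (pvIns (fun o => (g o).insert kx (vf o))) t := by
  induction os with
  | nil => intro t _; rfl
  | cons o os ih =>
    intro t hg
    simp only [List.foldl_cons]
    have hstep : t.insert o (((t.get? o).getD PySem.Dict.empty).insert kx (vf o)) =
        t.insert o ((g o).insert kx (vf o)) := by
      rcases hg o (by simp) with h1 | h1
      · rw [h1]; rfl
      · rw [h1]
        simp only [Option.getD_some]
        rw [PySem.Dict.insert_insert_self]
    rw [hstep]
    apply ih
    intro o' ho'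
    by_cases hoo : o' = o
    · subst hoo; right; exact PySem.Dict.get?_insert_self _ _ _
    · rw [PySem.Dict.get?_insert_of_ne _ _ hoo]
      exact hg o' (by simp [ho'])

theorem pvFresh_map_overwrite (g g' : String → PySem.Dict String Int) (os : List String) :
    ∀ (os' seen : List String), (∀ o ∈ os', o ∈ os) →
    (pvFresh g os' seen).map (fun p => if p.1 ∈ os then (p.1, g' p.1) else p) =
      pvFresh g' os' seen := by
  intro os'
  induction os' with
  | nil => simp [pvFresh]
  | cons o os'' ih =>
    intro seen hsub
    by_cases hs : o ∈ seen
    · simp only [pvFresh, hs, if_pos]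
      exact ih seen (fun x hx => hsub x (by simp [hx]))
    · simp only [pvFresh, hs, if_neg, Bool.false_eq_true, not_false_iff, List.map_cons]
      rw [ih (seen ++ [o]) (fun x hx => hsub x (by simp [hx]))]
      congr 1
      simp [hsub o (by simp)]

theorem pvFresh_nil_of_seen (h : String → PySem.Dict String Int) (os' : List String) :
    ∀ (seen : List String), (∀ o ∈ os', o ∈ seen) → pvFresh h os' seen = [] := by
  induction os' with
  | nil => intro seen _; rfl
  | cons o os'' ih =>
    intro seen hsub
    simp only [pvFresh, hsub o (by simp), if_pos]
    exact ih seen (fun x hx => hsub x (by simp [hx]))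

-- collapsing a second full pass of inserts over the same keys
theorem pvCollapse (g g' : String → PySem.Dict String Int) (os : List String) :
    os.foldl (pvIns g') (os.foldl (pvIns g) PySem.Dict.empty) = os.foldl (pvIns g') PySem.Dict.empty := by
  apply PySem.Dict.ext
  have hinner : (os.foldl (pvIns g) (PySem.Dict.empty : PySem.Dict String (PySem.Dict String Int))).items
      = pvFresh g os [] := by
    rw [pvItems_foldl_ins]; simp [PySem.Dict.empty]
  have hkeys : (os.foldl (pvIns g) (PySem.Dict.empty : PySem.Dict String (PySem.Dict String Int))).keys
      = (pvFresh g os []).map Prod.fst := by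
    show (os.foldl (pvIns g) (PySem.Dict.empty : PySem.Dict String (PySem.Dict String Int))).items.map Prod.fst = _
    rw [hinner]
  rw [pvItems_foldl_ins, hinner, hkeys, pvItems_foldl_ins]
  have hcov : ∀ o ∈ os, o ∈ (pvFresh g os []).map Prod.fst := by
    intro o ho
    rcases pvFresh_covers g os [] o ho with h1 | h1
    · simp at h1
    · exact h1
  rw [pvFresh_nil_of_seen g' os _ hcov]
  rw [pvFresh_map_overwrite g g' os os [] (fun _ hx => hx)]
  simp [PySem.Dict.empty, pvFresh]

theorem pvRowsFold (os : List String) (keyf : List Int → String) (valf : String → List Int → Int)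
    (L : List (List Int)) :
    ∀ (g : String → PySem.Dict String Int),
    L.foldl (fun tt x => os.foldl (fun tt o =>
        tt.insert o (((tt.get? o).getD PySem.Dict.empty).insert (keyf x) (valf o x))) tt)
      (os.foldl (pvIns g) PySem.Dict.empty)
    = os.foldl (pvIns (fun o => L.foldl (fun d x => d.insert (keyf x) (valf o x)) (g o))) PySem.Dict.empty := by
  induction L with
  | nil => intro g; rfl
  | cons x L ih =>
    intro g
    simp only [List.foldl_cons]
    rw [pvG (keyf x) (fun o => valf o x) g os _ (by
      intro o ho
      left
      rw [pvGet?_foldl_ins g os _ o]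
      simp [ho])]
    rw [pvCollapse g (fun o => (g o).insert (keyf x) (valf o x)) os]
    exact ih _

theorem pvFoldl_ins_congr (os : List String) :
    ∀ (h1 h2 : String → PySem.Dict String Int) (t : PySem.Dict String (PySem.Dict String Int)),
    (∀ o ∈ os, h1 o = h2 o) → os.foldl (pvIns h1) t = os.foldl (pvIns h2) t := by
  induction os with
  | nil => intro _ _ _ _; rfl
  | cons o os ih =>
    intro h1 h2 t hcong
    simp only [List.foldl_cons]
    rw [show pvIns h1 t o = pvIns h2 t o from by simp [pvIns, hcong o (by simp)]]
    exact ih h1 h2 _ (fun x hx => hcong x (by simp [hx]))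

theorem pvMatchTermA_eq_all (vals : List Char) (l : List (Int × Char)) :
    pvMatchTermA vals l = l.all (fun p => (p.2 == '-') ||
      (match PySem.List.pyGet? vals p.1 with | some c => p.2 == c | none => false)) := by
  induction l with
  | nil => rfl
  | cons p rest ih =>
    obtain ⟨idx, ch⟩ := p
    by_cases hch : ch = '-'
    · simp [pvMatchTermA, hch, ih]
    · rcases hg : PySem.List.pyGet? vals idx with _ | c
      · simp [pvMatchTermA, hch, hg]
      · by_cases hceq : ch = c
        · simp [pvMatchTermA, hch, hg, hceq, ih]
        · simp [pvMatchTermA, hch, hg, hceq]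

theorem pvValueA_any (vals : List Char) (ts : List String) :
    pvValueA vals ts = if ts.any (fun t => pvMatchTermA vals (PySem.List.enumerate t.toList)) then 1 else 0 := by
  induction ts with
  | nil => rfl
  | cons t ts ih =>
    by_cases hm : pvMatchTermA vals (PySem.List.enumerate t.toList) = true
    · simp [pvValueA, hm]
    · simp [pvValueA, hm, ih]

theorem pvFlatMap_singletons {α β : Type} (g : α → List β) (d : β) (L : List α)
    (h : ∀ v ∈ L, ∃ ch, g v = [ch]) : L.flatMap g = L.map (fun v => (g v).headD d) := by
  induction L with
  | nil => rfl
  | cons x L ih =>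
    obtain ⟨ch, hch⟩ := h x (by simp)
    simp only [List.flatMap_cons, List.map_cons, hch]
    rw [ih (fun v hv => h v (by simp [hv]))]
    rfl

theorem pvAllCongr {α : Type} (l : List α) (p q : α → Bool) (h : ∀ x ∈ l, p x = q x) :
    l.all p = l.all q := by
  induction l with
  | nil => rfl
  | cons x l ih => simp only [List.all_cons, h x (by simp), ih (fun y hy => h y (by simp [hy]))]

theorem pvAnyCongr {α : Type} (l : List α) (p q : α → Bool) (h : ∀ x ∈ l, p x = q x) :
    l.any p = l.any q := by
  induction l with
  | nil => rfl
  | cons x l ih => simp only [List.any_cons, h x (by simp), ih (fun y hy => h y (by simp [hy]))]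

-- ===== bitmask lemmas for port B =====

-- per-row boolean meaning of one 'k, ch' mask step
def pvCharOk (srcs : List Nat) (r : Nat) (p : Int × Char) : Bool :=
  if p.2 = '-' then true
  else match srcs[p.1.toNat]? with
    | some s => if p.2 = '1' then s.testBit r else if p.2 = '0' then !s.testBit r else false
    | none => false

theorem pvFullBit (size r : Nat) (hr : r < size) : (2 ^ size - 1).testBit r = true := by
  rw [Nat.testBit_two_pow_sub_one]
  simp [hr]

theorem pvMaskStep_bit (size r : Nat) (hr : r < size) (srcs : List Nat)
    (m : Nat) (p : Int × Char) :
    (pvMaskStepB (2 ^ size - 1) srcs m p).testBit r = (m.testBit r && pvCharOk srcs r p) := by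
  obtain ⟨idx, ch⟩ := p
  by_cases hch : ch = '-'
  · simp [pvMaskStepB, pvCharOk, hch]
  · rcases hsk : srcs[idx.toNat]? with _ | s
    · simp [pvMaskStepB, pvCharOk, hch, hsk, Nat.zero_testBit]
    · by_cases h1 : ch = '1'
      · simp [pvMaskStepB, pvCharOk, hch, hsk, h1, Nat.testBit_and]
      · by_cases h0 : ch = '0'
        · subst h0
          simp only [pvMaskStepB, pvCharOk, hsk]
          show (m &&& ((2 ^ size - 1) ^^^ s)).testBit r = (m.testBit r && !s.testBit r)
          rw [Nat.testBit_and, Nat.testBit_xor, pvFullBit size r hr]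
          cases hm : m.testBit r <;> cases hs : s.testBit r <;> simp
        · simp [pvMaskStepB, pvCharOk, hch, hsk, h1, h0, Nat.zero_testBit]

theorem pvMask_bit (size r : Nat) (hr : r < size) (srcs : List Nat) (l : List (Int × Char)) :
    ∀ m : Nat, (l.foldl (pvMaskStepB (2 ^ size - 1) srcs) m).testBit r
      = (m.testBit r && l.all (pvCharOk srcs r)) := by
  induction l with
  | nil => intro m; simp
  | cons p l ih =>
    intro m
    simp only [List.foldl_cons, ih, pvMaskStep_bit size r hr, List.all_cons, Bool.and_assoc]

theorem pvAcc_bit (size r : Nat) (hr : r < size) (srcs : List Nat) (ts : List String) :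
    ∀ acc : Nat,
    (ts.foldl (fun acc t =>
        acc ||| ((PySem.List.enumerate t.toList).foldl (pvMaskStepB (2 ^ size - 1) srcs) (2 ^ size - 1))) acc).testBit r
      = (acc.testBit r || ts.any (fun t => (PySem.List.enumerate t.toList).all (pvCharOk srcs r))) := by
  induction ts with
  | nil => intro acc; simp
  | cons t ts ih =>
    intro acc
    simp only [List.foldl_cons, ih, List.any_cons]
    rw [Nat.testBit_or, pvMask_bit size r hr, pvFullBit size r hr]
    simp [Bool.or_assoc]

theorem pvFoldBits (g : Nat → Nat) (hg : ∀ x, g x ≤ 1) (m : Nat) :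
    ∀ r : Nat, ((List.range m).foldl (fun col x => col ||| (g x) <<< x) 0).testBit r
      = (decide (r < m) && (g r == 1)) := by
  induction m with
  | zero => intro r; simp [Nat.zero_testBit]
  | succ m ih =>
    intro r
    rw [List.range_succ, List.foldl_append, List.foldl_cons, List.foldl_nil]
    rw [Nat.testBit_or, ih r, Nat.testBit_shiftLeft]
    by_cases hrm : r < m
    · have : ¬ (m ≤ r) := by omega
      simp [hrm, this, Nat.lt_succ_of_lt hrm]
    · by_cases hre : r = m
      · subst hre
        have hgr := hg r
        have hb : (g r).testBit 0 = (g r == 1) := by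
          interval_cases h : g r <;> simp
        simp [hrm, hb]
      · have h1 : ¬ (r < m + 1) := by omega
        have h2 : m ≤ r := by omega
        have h3 : (g m).testBit (r - m) = false := by
          apply Nat.testBit_eq_false_of_lt
          have : g m ≤ 1 := hg m
          have : (2:Nat) ≤ 2 ^ (r - m) := by
            have : 1 ≤ r - m := by omega
            calc (2:Nat) = 2 ^ 1 := rfl
            _ ≤ 2 ^ (r - m) := Nat.pow_le_pow_right (by norm_num) this
          omega
        simp [hrm, h1, h2, h3]

theorem pvInColB_bit (n i size r : Nat) (hr : r < size) :
    (pvInColB n i size).testBit r = ((r >>> (n - 1 - i)) &&& 1 == 1) := by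
  unfold pvInColB
  rw [pvFoldBits (fun x => (x >>> (n - 1 - i)) &&& 1) (fun x => by
    have := Nat.and_le_right (n := x >>> (n - 1 - i)) (m := 1)
    omega) size r]
  simp [hr]

theorem pvShiftAnd (x k : Nat) : (x >>> k) &&& 1 = x / 2 ^ k % 2 := by
  rw [Nat.shiftRight_eq_div_pow, Nat.and_one_is_mod]

theorem pvBitShift (n i r : Nat) : pvBitB n i r = (r >>> (n - 1 - i)) &&& 1 := by
  rw [pvShiftAnd]; rfl

theorem pvBitVal (col r : Nat) :
    (((col >>> r) &&& 1 : Nat) : Int) = (if col.testBit r then (1 : Int) else 0) := by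
  have ht : col.testBit r = ((col >>> r) % 2 != 0) := by
    simp [Nat.testBit, Nat.one_and_eq_mod_two]
  rw [Nat.and_one_is_mod, ht]
  rcases Nat.mod_two_eq_zero_or_one (col >>> r) with h | h <;> simp [h]

-- the central simulation: evaluating var_order row by row agrees with the bitset columns
theorem pvSim (fns : PySem.Dict String (List String × List String)) (size : Nat) (vo : List String) :
    ∀ (cols : PySem.Dict String Nat) (asg : Nat → PySem.Dict String Int),
    (∀ r, r < size → ∀ v, (asg r).get? v = (cols.get? v).map (fun col => if col.testBit r then (1:Int) else 0)) →
    (∀ r, r < size → ∀ v, (vo.foldl (pvEvalVarA fns) (asg r)).get? v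
        = ((vo.foldl (pvColStepB fns (2 ^ size - 1)) cols).get? v).map
            (fun col => if col.testBit r then (1:Int) else 0)) := by
  induction vo with
  | nil => intro cols asg hrel; exact hrel
  | cons var vo ih =>
    intro cols asg hrel
    set fn := (fns.get? var).getD ([], []) with hfn
    set srcs := fn.1.map (fun v => (cols.get? v).getD 0) with hsrcs_def
    set acc := fn.2.foldl (fun acc t =>
        acc ||| ((PySem.List.enumerate t.toList).foldl (pvMaskStepB (2 ^ size - 1) srcs) (2 ^ size - 1))) 0
      with hacc_def
    have hstepB : pvColStepB fns (2 ^ size - 1) cols var = cols.insert var acc := rfl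
    have hvals_eq : ∀ r, r < size →
        (fn.1.flatMap (fun v => match (asg r).get? v with
          | some x => (PySem.Int.toStr x).toList
          | none => ['0']))
        = fn.1.map (fun v => if ((cols.get? v).getD 0).testBit r then '1' else '0') := by
      intro r hr
      rw [pvFlatMap_singletons _ '0' _ (by
        intro v _
        rw [hrel r hr v]
        rcases hg : cols.get? v with _ | col
        · exact ⟨'0', rfl⟩
        · by_cases hb : col.testBit r <;> simp [hb] <;> exact ⟨_, rfl⟩)]
      apply List.map_congr_left
      intro v _
      rw [hrel r hr v]
      rcases hg : cols.get? v with _ | col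
      · simp [Nat.zero_testBit]
      · by_cases hb : col.testBit r <;> simp [hb] <;> rfl
    have hstep_val : ∀ r, r < size →
        pvEvalVarA fns (asg r) var = (asg r).insert var (if acc.testBit r then (1:Int) else 0) := by
      intro r hr
      show (asg r).insert var _ = (asg r).insert var _
      congr 1
      have hvals : ∀ k : Nat,
          (fn.1.map (fun v => if ((cols.get? v).getD 0).testBit r then '1' else '0'))[k]?
            = (srcs[k]?).map (fun s => if s.testBit r then '1' else '0') := by
        intro k
        rw [hsrcs_def, List.getElem?_map, List.getElem?_map]
        rcases fn.1[k]? with _ | v <;> simp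
      have hmatch : ∀ t : String,
          pvMatchTermA (fn.1.map (fun v => if ((cols.get? v).getD 0).testBit r then '1' else '0'))
              (PySem.List.enumerate t.toList)
            = (PySem.List.enumerate t.toList).all (pvCharOk srcs r) := by
        intro t
        rw [pvMatchTermA_eq_all]
        apply pvAllCongr
        intro p hp
        rw [PySem.List.mem_enumerate_iff] at hp
        obtain ⟨k, hk, rfl⟩ := hp
        simp only [pvCharOk]
        by_cases hch : t.toList[k] = '-'
        · simp [hch]
        · have hidx : ((0 : Int) + k).toNat = k := by omega
          have hpg : PySem.List.pyGet?
              (fn.1.map (fun v => if ((cols.get? v).getD 0).testBit r then '1' else '0')) ((0 : Int) + k)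
              = (fn.1.map (fun v => if ((cols.get? v).getD 0).testBit r then '1' else '0'))[k]? := by
            rw [show ((0 : Int) + k) = (k : Int) from by omega, PySem.List.pyGet?_natCast]
          rw [if_neg hch, hpg, hvals k, hidx]
          rcases hsk : srcs[k]? with _ | s
          · simp [hch]
          · simp only [Option.map_some]
            revert hch
            generalize t.toList[k] = c
            intro hch
            by_cases h1 : c = '1'
            · subst h1
              cases hb : s.testBit r <;> simp [hb]
            · by_cases h0 : c = '0'
              · subst h0
                cases hb : s.testBit r <;> simp [hb]
              · cases hb : s.testBit r <;> simp [h1, h0, hch, hb]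
      rw [hvals_eq r hr, pvValueA_any,
          pvAnyCongr fn.2 _ _ (fun t _ => hmatch t)]
      rw [hacc_def, pvAcc_bit size r hr, Nat.zero_testBit, Bool.false_or]
    have hrel' : ∀ r, r < size → ∀ v, ((asg r).insert var (if acc.testBit r then (1:Int) else 0)).get? v
        = ((cols.insert var acc).get? v).map (fun col => if col.testBit r then (1:Int) else 0) := by
      intro r hr v
      by_cases hv : v = var
      · subst hv
        rw [PySem.Dict.get?_insert_self, PySem.Dict.get?_insert_self]
        rfl
      · rw [PySem.Dict.get?_insert_of_ne _ _ hv, PySem.Dict.get?_insert_of_ne _ _ hv]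
        exact hrel r hr v
    intro r hr v
    rw [List.foldl_cons, List.foldl_cons, hstepB, hstep_val r hr]
    exact ih (cols.insert var acc) (fun r => (asg r).insert var (if acc.testBit r then (1:Int) else 0))
      hrel' r hr v

theorem pvBaseRel (n size r : Nat) (hr : r < size) (xs : List String) :
    ∀ (j : Nat) (d1 : PySem.Dict String Int) (d2 : PySem.Dict String Nat),
    (∀ v, d1.get? v = (d2.get? v).map (fun col => if col.testBit r then (1:Int) else 0)) →
    ∀ v, ((xs.zip ((List.range' j xs.length).map (fun i => (pvBitB n i r : Int)))).foldl
        (fun d (p : String × Int) => d.insert p.1 p.2) d1).get? v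
      = (((PySem.List.enumerate xs (j : Int)).foldl
        (fun d (p : Int × String) => d.insert p.2 (pvInColB n p.1.toNat size)) d2).get? v).map
          (fun col => if col.testBit r then (1:Int) else 0) := by
  induction xs with
  | nil => intro j d1 d2 hrel v; simpa [PySem.List.enumerate] using hrel v
  | cons x xs ih =>
    intro j d1 d2 hrel v
    rw [show (x :: xs).length = xs.length + 1 from rfl, List.range'_succ, List.map_cons,
        List.zip_cons_cons, List.foldl_cons]
    rw [show PySem.List.enumerate (x :: xs) (j : Int) = ((j : Int), x) :: PySem.List.enumerate xs ((j : Int) + 1) from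
      PySem.List.enumerate_cons x xs (j : Int)]
    rw [List.foldl_cons]
    have hcast : ((j : Int) + 1) = ((j + 1 : Nat) : Int) := by push_cast; ring
    rw [hcast]
    apply ih (j + 1)
    intro w
    by_cases hw : w = x
    · subst hw
      rw [PySem.Dict.get?_insert_self, PySem.Dict.get?_insert_self]
      simp only [Option.map_some, Option.some.injEq]
      rw [show ((j : Int)).toNat = j from by omega]
      rw [pvInColB_bit n j size r hr, pvBitShift n j r]
      rcases Nat.mod_two_eq_zero_or_one (r / 2 ^ (n - 1 - j)) with h | h <;>
        · rw [pvShiftAnd] <;> simp [pvBitB, h]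
    · rw [PySem.Dict.get?_insert_of_ne _ _ hw, PySem.Dict.get?_insert_of_ne _ _ hw]
      exact hrel w

theorem pvSome_insfold {κ α ν : Type} [BEq κ] [LawfulBEq κ] (key : α → κ) (colf : α → ν) (l : List α) :
    ∀ (d : PySem.Dict κ ν) (v : κ), (v ∈ l.map key ∨ (d.get? v).isSome) →
    ((l.foldl (fun d p => d.insert (key p) (colf p)) d).get? v).isSome := by
  induction l with
  | nil =>
    intro d v h
    rcases h with h | h
    · simp at h
    · exact h
  | cons p l ih =>
    intro d v h
    rw [List.foldl_cons]
    apply ih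
    by_cases hv : v = key p
    · subst hv
      right
      rw [PySem.Dict.get?_insert_self]
      rfl
    · rcases h with h | h
      · rcases List.mem_map.mp h with ⟨q, hq, rfl⟩
        rcases List.mem_cons.mp hq with h1 | h1
        · exact absurd (h1 ▸ rfl) hv
        · exact Or.inl (List.mem_map.mpr ⟨q, h1, rfl⟩)
      · right
        rw [PySem.Dict.get?_insert_of_ne _ _ hv]
        exact h

theorem pvContains_colfold (fns : PySem.Dict String (List String × List String)) (full : Nat)
    (vo : List String) :
    ∀ (cols : PySem.Dict String Nat) (v : String),
    ((cols.get? v).isSome ∨ v ∈ vo) →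
    ((vo.foldl (pvColStepB fns full) cols).get? v).isSome := by
  induction vo with
  | nil =>
    intro cols v h
    rcases h with h | h
    · exact h
    · simp at h
  | cons var vo ih =>
    intro cols v h
    rw [List.foldl_cons]
    apply ih
    by_cases hv : v = var
    · subst hv
      left
      rw [show pvColStepB fns full cols v = cols.insert v _ from rfl, PySem.Dict.get?_insert_self]
      rfl
    · rcases h with h | h
      · left
        rw [show pvColStepB fns full cols var = cols.insert var _ from rfl,
            PySem.Dict.get?_insert_of_ne _ _ hv]
        exact h
      · rcases List.mem_cons.mp h with h1 | h1
        · exact absurd h1 hv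
        · exact Or.inr h1

theorem pvVoSpec (nbs : List (List (String × List String))) :
    ∀ (vo0 : List String) (fns0 : PySem.Dict String (List String × List String)),
    (nbs.foldl pvParseStepB (vo0, fns0)).1
      = vo0 ++ nbs.map (fun b => (PySem.List.pyGet? ((PySem.Dict.mk b).getD "inputs_outputs" []) (-1)).getD "") := by
  induction nbs with
  | nil => intro vo0 fns0; simp
  | cons b bs ih =>
    intro vo0 fns0
    rw [List.foldl_cons, List.map_cons]
    rw [show pvParseStepB (vo0, fns0) b
      = (vo0 ++ [(PySem.List.pyGet? ((PySem.Dict.mk b).getD "inputs_outputs" []) (-1)).getD ""],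
         fns0.insert ((PySem.List.pyGet? ((PySem.Dict.mk b).getD "inputs_outputs" []) (-1)).getD "")
           (PySem.List.slice ((PySem.Dict.mk b).getD "inputs_outputs" []) none (some (-1)),
            pvTermsB ((PySem.Dict.mk b).getD "lines" []))) from rfl]
    rw [ih]
    simp

theorem pvMain (mn : String) (inputs outputs : List String) (nbs : List (List (String × List String)))
    (hcov : ∀ o ∈ outputs, o ∈ inputs ∨
      ∃ b ∈ nbs, PySem.List.pyGet? ((PySem.Dict.mk b).getD "inputs_outputs" []) (-1) = some o) :
    simulate_blif mn inputs outputs nbs = simulate_blif_alt mn inputs outputs nbs := by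
  have hparse : (nbs.foldl (pvBlockStepA outputs)
      (PySem.Set.update (PySem.Set.ofList inputs) outputs, PySem.Set.ofList [], [], PySem.Dict.empty)).2.2
      = nbs.foldl pvParseStepB ([], PySem.Dict.empty) :=
    pvParseEq outputs nbs _ _ [] PySem.Dict.empty
  set pb := nbs.foldl pvParseStepB ([], PySem.Dict.empty) with hpb
  set vo := pb.1 with hvo
  set fns := pb.2 with hfns
  set n := inputs.length with hn
  set size := 2 ^ n with hsize
  set keyf : List Int → String := fun bits => PySem.Str.join "" (bits.map PySem.Int.toStr) with hkeyf
  set asg0 : List Int → PySem.Dict String Int :=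
    fun bits => (inputs.zip bits).foldl (fun d (p : String × Int) => d.insert p.1 p.2) PySem.Dict.empty with hasg0
  set valf : String → List Int → Int :=
    fun o bits => ((vo.foldl (pvEvalVarA fns) (asg0 bits)).get? o).getD 0 with hvalf
  set cols0 : PySem.Dict String Nat :=
    (PySem.List.enumerate inputs).foldl (fun d (p : Int × String) =>
      d.insert p.2 (pvInColB n p.1.toNat size)) PySem.Dict.empty with hcols0
  set colsF := vo.foldl (pvColStepB fns (2 ^ size - 1)) cols0 with hcolsF
  set keysB : List String := (List.range size).map (fun r =>
      PySem.Str.join "" ((List.range n).map (fun i =>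
        if (r >>> (n - 1 - i)) &&& 1 = 1 then "1" else "0"))) with hkeysB
  set bitsI : Nat → List Int := fun r => (List.range n).map (fun i => (pvBitB n i r : Int)) with hbitsI
  have hrel0 : ∀ r, r < size → ∀ v, (asg0 (bitsI r)).get? v
      = (cols0.get? v).map (fun col => if col.testBit r then (1:Int) else 0) := by
    intro r hr v
    have := pvBaseRel n size r hr inputs 0 PySem.Dict.empty PySem.Dict.empty
      (by intro w; rw [PySem.Dict.get?_empty]; rfl) v
    simp only [Nat.cast_zero] at this
    rw [show inputs.length = n from hn.symm] at this
    rw [← List.range_eq_range'] at this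
    rw [hasg0, hbitsI, hcols0]
    exact this
  have hrelF := pvSim fns size vo cols0 (fun r => asg0 (bitsI r)) hrel0
  -- every primary output has a final column
  have hsomeF : ∀ o ∈ outputs, (colsF.get? o).isSome := by
    intro o ho
    rcases hcov o ho with hin | ⟨b, hb, hlast⟩
    · apply pvContains_colfold
      left
      apply pvSome_insfold (fun p : Int × String => p.2)
      left
      rw [show (PySem.List.enumerate inputs).map (fun p : Int × String => p.2)
          = inputs from by simpa using PySem.List.map_snd_enumerate inputs 0]
      exact hin
    · apply pvContains_colfold
      right
      rw [hvo, hpb, pvVoSpec nbs [] PySem.Dict.empty]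
      simp only [List.nil_append]
      apply List.mem_map.mpr
      exact ⟨b, hb, by rw [hlast]; rfl⟩
  -- the two tables agree
  have htab : (pvProdA n).foldl (fun tt bits => outputs.foldl (fun tt o =>
        tt.insert o (((tt.get? o).getD PySem.Dict.empty).insert (keyf bits) (valf o bits))) tt)
        (outputs.foldl (pvIns (fun _ => PySem.Dict.empty)) PySem.Dict.empty)
      = outputs.foldl (fun tt o => tt.insert o ((PySem.List.enumerate keysB).foldl
          (fun (d : PySem.Dict String Int) p =>
            d.insert p.2 (((((colsF.get? o).getD 0) >>> p.1.toNat) &&& 1 : Nat) : Int))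
          PySem.Dict.empty)) PySem.Dict.empty := by
    rw [pvRowsFold outputs keyf valf (pvProdA n) (fun _ => PySem.Dict.empty)]
    apply pvFoldl_ins_congr
    intro o ho
    obtain ⟨col, hcol⟩ := Option.isSome_iff_exists.mp (hsomeF o ho)
    have hpair : (pvProdA n).map (fun bits => (keyf bits, valf o bits))
        = (PySem.List.enumerate keysB).map (fun p =>
            (p.2, (((col >>> p.1.toNat) &&& 1 : Nat) : Int))) := by
      apply List.ext_getElem?
      intro r
      rw [List.getElem?_map, List.getElem?_map, PySem.List.getElem?_enumerate]
      by_cases hr : r < size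
      · rw [pvProdA_getElem? n r (by omega)]
        have hkey : keysB[r]? = some (keyf (bitsI r)) := by
          rw [hkeysB, List.getElem?_map, List.getElem?_range (by omega)]
          simp only [Option.map_some, Option.some.injEq]
          show PySem.Str.join "" ((List.range n).map (fun i =>
              if (r >>> (n - 1 - i)) &&& 1 = 1 then "1" else "0"))
            = PySem.Str.join "" (((List.range n).map (fun i => ((pvBitB n i r : Nat) : Int))).map PySem.Int.toStr)
          rw [List.map_map]
          congr 1
          apply List.map_congr_left
          intro i _
          show (if (r >>> (n - 1 - i)) &&& 1 = 1 then "1" else "0") = PySem.Int.toStr (pvBitB n i r : Nat)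
          rw [pvBitShift n i r]
          rcases Nat.mod_two_eq_zero_or_one (r / 2 ^ (n - 1 - i)) with h | h <;>
            rw [pvShiftAnd] <;> simp [h] <;> rfl
        have hval : valf o (bitsI r) = ((col >>> r) &&& 1 : Nat) := by
          show ((vo.foldl (pvEvalVarA fns) (asg0 (bitsI r))).get? o).getD 0 = _
          rw [hrelF r hr o, hcol]
          simp only [Option.map_some, Option.getD_some]
          rw [pvBitVal col r]
        rw [hkey]
        simp only [Option.map_some, Option.some.injEq]
        rw [show ((0 : Int) + (r : Int)).toNat = r from by omega, hval]
      · have hpl : (pvProdA n)[r]? = none := by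
          rw [List.getElem?_eq_none]
          rw [pvProdA_length]; omega
        have hkl : keysB[r]? = none := by
          rw [List.getElem?_eq_none]
          rw [hkeysB, List.length_map, List.length_range]; omega
        rw [hpl, hkl]
        rfl
    show (pvProdA n).foldl (fun d bits => d.insert (keyf bits) (valf o bits)) PySem.Dict.empty = _
    calc (pvProdA n).foldl (fun d bits => d.insert (keyf bits) (valf o bits)) PySem.Dict.empty
        = ((pvProdA n).map (fun bits => (keyf bits, valf o bits))).foldl
            (fun (d : PySem.Dict String Int) p => d.insert p.1 p.2) PySem.Dict.empty := by
          rw [List.foldl_map]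
      _ = ((PySem.List.enumerate keysB).map (fun p =>
            (p.2, (((col >>> p.1.toNat) &&& 1 : Nat) : Int)))).foldl
            (fun (d : PySem.Dict String Int) p => d.insert p.1 p.2) PySem.Dict.empty := by
          rw [hpair]
      _ = (PySem.List.enumerate keysB).foldl
            (fun (d : PySem.Dict String Int) p =>
              d.insert p.2 (((((colsF.get? o).getD 0) >>> p.1.toNat) &&& 1 : Nat) : Int))
            PySem.Dict.empty := by
          rw [List.foldl_map, hcol]
          rfl
  have hA : simulate_blif mn inputs outputs nbs =
      (((pvProdA n).foldl (fun tt bits => outputs.foldl (fun tt o =>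
          tt.insert o (((tt.get? o).getD PySem.Dict.empty).insert (keyf bits)
            ((((nbs.foldl (pvBlockStepA outputs)
                (PySem.Set.update (PySem.Set.ofList inputs) outputs, PySem.Set.ofList [], [], PySem.Dict.empty)).2.2.1.foldl
                  (pvEvalVarA (nbs.foldl (pvBlockStepA outputs)
                    (PySem.Set.update (PySem.Set.ofList inputs) outputs, PySem.Set.ofList [], [], PySem.Dict.empty)).2.2.2)
                  (asg0 bits)).get? o).getD 0))) tt)
        (outputs.foldl (pvIns (fun _ => PySem.Dict.empty)) PySem.Dict.empty)).items.map
          (fun p => (p.1, p.2.items)), inputs) := rfl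
  have hB : simulate_blif_alt mn inputs outputs nbs =
      ((outputs.foldl (fun tt o => tt.insert o ((PySem.List.enumerate keysB).foldl
          (fun (d : PySem.Dict String Int) p =>
            d.insert p.2 (((((colsF.get? o).getD 0) >>> p.1.toNat) &&& 1 : Nat) : Int))
          PySem.Dict.empty)) PySem.Dict.empty).items.map
          (fun p => (p.1, p.2.items)), inputs) := rfl
  rw [hA, hB]
  rw [show (nbs.foldl (pvBlockStepA outputs)
      (PySem.Set.update (PySem.Set.ofList inputs) outputs, PySem.Set.ofList [], [], PySem.Dict.empty)).2.2.1 = vo from by rw [hparse]]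
  rw [show (nbs.foldl (pvBlockStepA outputs)
      (PySem.Set.update (PySem.Set.ofList inputs) outputs, PySem.Set.ofList [], [], PySem.Dict.empty)).2.2.2 = fns from by rw [hparse]]
  rw [htab]

-- ===== VERDICT (by name: the statement is the Claim_ definition above) =====
theorem simulate_blif_spec : Claim_equal_simulate_blif := by
  intro model_name inputs outputs names_blocks _hDom hPre
  unfold Spec_simulate_blif
  exact pvMain model_name inputs outputs names_blocks hPre.2
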